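-- pv_equiv track=rewrite | github.com/delyoussoufi/test_2 | backend/flaskapp/utils/number_utils.py | build_filling_string
-- ===== SOURCE A (Python) =====
-- def build_filling_string(digits: str, filling: int) -> str:
--     filling_string = ""
--     if len(digits) < filling:
--         i = 0
--         while i < filling - len(digits):
--             i += 1
--             filling_string += "0"
--     filling_string += digits
--     return filling_string
-- ===== SOURCE B (Python) =====
-- def build_filling_string(digits: str, filling: int) -> str:
--     return "0" * max(0, filling - len(digits)) + digits
-- ===== Notes on version B (the rewrite author's own statement) =====
-- stated objective: simpler
-- what changed: Replaces the while loop that appends one '0' per iteration with a closed-form padding expression '0' * max(0, filling - len(digits)) prepended to digits.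
import Mathlib
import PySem

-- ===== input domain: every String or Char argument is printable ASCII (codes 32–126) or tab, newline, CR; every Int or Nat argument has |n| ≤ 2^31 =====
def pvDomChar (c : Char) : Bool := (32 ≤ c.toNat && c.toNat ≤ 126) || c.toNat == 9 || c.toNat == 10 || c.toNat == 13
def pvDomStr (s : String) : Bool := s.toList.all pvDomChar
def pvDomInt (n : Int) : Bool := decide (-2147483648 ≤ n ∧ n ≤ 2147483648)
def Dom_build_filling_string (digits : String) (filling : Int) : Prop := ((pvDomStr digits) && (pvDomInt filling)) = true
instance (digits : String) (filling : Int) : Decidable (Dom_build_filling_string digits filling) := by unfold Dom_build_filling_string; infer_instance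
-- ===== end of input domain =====

-- B replaces A's one-'0'-per-iteration while loop with the closed form "0" * max(0, filling - len(digits)) + digits (simpler).
-- ===== PORT A =====
-- A-side helper: the while loop, one '0' appended per iteration
def pvALoop : Nat → List Char → List Char
  | 0, acc => acc
  | n+1, acc => pvALoop n (acc ++ ['0'])

def build_filling_string (digits : String) (filling : Int) : String :=
  let fs : List Char := []
  let fs := if (digits.toList.length : Int) < filling then
      pvALoop (filling - (digits.toList.length : Int)).toNat fs
    else fs
  String.ofList (fs ++ digits.toList)

-- ===== PORT B =====
-- B: closed-form padding, "0" * max(0, filling - len(digits)) + digits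
def build_filling_string_alt (digits : String) (filling : Int) : String :=
  String.ofList (List.replicate (max 0 (filling - (digits.toList.length : Int))).toNat '0' ++ digits.toList)

-- ===== PRECONDITION & SPEC =====
def Spec_build_filling_string (digits : String) (filling : Int) (out : String) : Prop := out = build_filling_string_alt digits filling
instance (digits : String) (filling : Int) (out : String) : Decidable (Spec_build_filling_string digits filling out) := by unfold Spec_build_filling_string; infer_instance

-- ===== CLAIM (what is proved, stated in full; the proofs are below) =====
def Claim_equal_build_filling_string : Prop := ∀ (digits : String) (filling : Int), Dom_build_filling_string digits filling → Spec_build_filling_string digits filling (build_filling_string digits filling)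

-- ===== LEMMAS AND PROOFS =====

theorem pvALoop_eq_replicate (n : Nat) (acc : List Char) :
    pvALoop n acc = acc ++ List.replicate n '0' := by
  induction n generalizing acc with
  | zero => simp [pvALoop]
  | succ k ih => simp [pvALoop, ih, List.replicate_succ]

-- ===== VERDICT (by name: the statement is the Claim_ definition above) =====
theorem build_filling_string_spec : Claim_equal_build_filling_string := by
  intro digits filling _
  unfold Spec_build_filling_string build_filling_string build_filling_string_alt
  have hl : digits.toList.length = digits.length := String.length_toList
  simp only [List.nil_append, pvALoop_eq_replicate]
  split_ifs with h
  · have he : (filling - (digits.toList.length : Int)).toNat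
        = (max 0 (filling - (digits.toList.length : Int))).toNat := by omega
    rw [he]
  · have h0 : (max 0 (filling - (digits.toList.length : Int))).toNat = 0 := by omega
    rw [h0]
    simp
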